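-- pv_equiv track=rewrite | github.com/Spontan/YHtWtG-Randomizer | logic/requirementcalculations.py | getIndexForRequirementOperationDicts
-- ===== SOURCE A (Python) =====
-- REQUIREMENTS_COUNT = 7
--
-- REQUIREMENTS_SIZE = 1 << (REQUIREMENTS_COUNT)
--
-- def getIndexForRequirementOperationDicts(firstOperand, secondOperand = None):
--     i = 0
--
--     for v in firstOperand:
--         i += v
--         i = i << REQUIREMENTS_COUNT
--     i = i >> REQUIREMENTS_COUNT
--
--     if secondOperand != None:
--         i = i << REQUIREMENTS_SIZE
--         i2 = 0
--         for v in secondOperand: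
--             i2 += v
--             i2 = i2 << REQUIREMENTS_COUNT
--         i2 = i2 >> REQUIREMENTS_COUNT
--
--         i += i2
--
--     return i
-- ===== SOURCE B (Python) =====
-- def getIndexForRequirementOperationDicts(firstOperand, secondOperand=None):
--     # closed-form base-128 positional packing instead of A's accumulate-and-shift loop
--     n = len(firstOperand)
--     i = sum(v << (7 * (n - 1 - idx)) for idx, v in enumerate(firstOperand))
--     if secondOperand is not None:
--         m = len(secondOperand)
--         i = (i << 128) + sum(v << (7 * (m - 1 - idx)) for idx, v in enumerate(secondOperand))
--     return i
-- ===== Notes on version B (the rewrite author's own statement) =====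
-- stated objective: alternative
-- what changed: Replaces A's accumulate-then-shift Horner loop (with a trailing corrective right-shift) by a direct closed-form positional sum: each value is shifted straight to its base-128 position and the per-operand sums are combined with one 128-bit shift.
import Mathlib
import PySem

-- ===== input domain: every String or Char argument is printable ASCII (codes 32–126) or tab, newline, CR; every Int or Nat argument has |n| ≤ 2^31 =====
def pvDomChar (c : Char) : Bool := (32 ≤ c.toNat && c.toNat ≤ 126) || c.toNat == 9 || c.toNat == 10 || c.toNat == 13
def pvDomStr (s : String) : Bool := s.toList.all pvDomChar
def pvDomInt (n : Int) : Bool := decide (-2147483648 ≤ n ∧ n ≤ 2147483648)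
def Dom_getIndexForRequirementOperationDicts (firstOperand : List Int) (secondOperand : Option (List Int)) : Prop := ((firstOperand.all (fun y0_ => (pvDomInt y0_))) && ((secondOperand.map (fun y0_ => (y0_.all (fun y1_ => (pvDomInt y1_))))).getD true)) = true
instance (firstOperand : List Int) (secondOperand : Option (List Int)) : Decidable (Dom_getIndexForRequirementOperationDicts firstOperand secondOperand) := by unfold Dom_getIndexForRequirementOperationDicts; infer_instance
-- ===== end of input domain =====

-- B states each operand's index in closed form (every value shifted directly to its
-- base-128 position and summed) instead of A's accumulate-then-shift loop; same cost, plainer.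

-- ===== PORT A =====
-- REQUIREMENTS_COUNT = 7, REQUIREMENTS_SIZE = 1 << 7 = 128; i << 7 on Int is i * 2^7,
-- i >> 7 is floor division by 2^7 (PySem.Int.floordiv) — exact for negative i too.
def getIndexForRequirementOperationDicts (firstOperand : List Int) (secondOperand : Option (List Int)) : Int :=
  let i := firstOperand.foldl (fun i v => (i + v) * 2 ^ 7) 0
  let i := PySem.Int.floordiv i (2 ^ 7)
  match secondOperand with
  | none => i
  | some s =>
    let i := i * 2 ^ 128
    let i2 := s.foldl (fun i2 v => (i2 + v) * 2 ^ 7) 0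
    let i2 := PySem.Int.floordiv i2 (2 ^ 7)
    i + i2

-- ===== PORT B =====
-- B helper: sum(v << (7*(n-1-idx)) for idx, v in enumerate(xs)); the shift amount is a
-- nonnegative Nat in Python, so `p.1.toNat` is exact (enumerate indices start at 0).
def pvPack (xs : List Int) : Int :=
  let n := xs.length
  ((PySem.List.enumerate xs).map (fun p => p.2 * 2 ^ (7 * (n - 1 - p.1.toNat)))).sum

def getIndexForRequirementOperationDicts_alt (firstOperand : List Int) (secondOperand : Option (List Int)) : Int :=
  let i := pvPack firstOperand
  match secondOperand with
  | none => i
  | some s => i * 2 ^ 128 + pvPack s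

-- ===== PRECONDITION & SPEC =====
def Spec_getIndexForRequirementOperationDicts (firstOperand : List Int) (secondOperand : Option (List Int)) (out : Int) : Prop := out = getIndexForRequirementOperationDicts_alt firstOperand secondOperand
instance (firstOperand : List Int) (secondOperand : Option (List Int)) (out : Int) : Decidable (Spec_getIndexForRequirementOperationDicts firstOperand secondOperand out) := by unfold Spec_getIndexForRequirementOperationDicts; infer_instance

-- ===== CLAIM (what is proved, stated in full; the proofs are below) =====
def Claim_equal_getIndexForRequirementOperationDicts : Prop := ∀ (firstOperand : List Int) (secondOperand : Option (List Int)), Dom_getIndexForRequirementOperationDicts firstOperand secondOperand → Spec_getIndexForRequirementOperationDicts firstOperand secondOperand (getIndexForRequirementOperationDicts firstOperand secondOperand)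

-- ===== LEMMAS AND PROOFS =====

-- positional value of xs in base 128 (most significant first)
def pvP : List Int → Int
  | [] => 0
  | v :: t => v * 2 ^ (7 * t.length) + pvP t

theorem pvFoldl_horner : ∀ (xs : List Int) (a : Int),
    xs.foldl (fun i v => (i + v) * 2 ^ 7) a = a * 2 ^ (7 * xs.length) + 2 ^ 7 * pvP xs := by
  intro xs
  induction xs with
  | nil => intro a; simp [pvP]
  | cons x t ih =>
      intro a
      simp only [List.foldl_cons, ih, pvP, List.length_cons]
      ring

theorem pvGen : ∀ (t : List Int) (s n : Nat), n = s + t.length →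
    ((PySem.List.enumerate t (s : Int)).map (fun p => p.2 * 2 ^ (7 * (n - 1 - p.1.toNat)))).sum
      = pvP t := by
  intro t
  induction t with
  | nil => intro s n _; simp [PySem.List.enumerate_nil, pvP]
  | cons x r ih =>
      intro s n hn
      have hlen : n = s + r.length + 1 := by simp at hn; omega
      have hexp : n - 1 - s = r.length := by omega
      have hcast : (s : Int) + 1 = ((s + 1 : Nat) : Int) := by push_cast; ring
      rw [PySem.List.enumerate_cons, List.map_cons, List.sum_cons, hcast,
        ih (s + 1) n (by omega)]
      simp [pvP, Int.toNat_natCast, hexp]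

theorem pvPack_eq (xs : List Int) : pvPack xs = pvP xs := by
  simpa using pvGen xs 0 xs.length (by simp)

theorem pvHorner_eq (xs : List Int) :
    PySem.Int.floordiv (xs.foldl (fun i v => (i + v) * 2 ^ 7) 0) (2 ^ 7) = pvP xs := by
  rw [pvFoldl_horner, PySem.Int.floordiv_eq_ediv_of_pos (by norm_num)]
  rw [zero_mul, zero_add, Int.mul_ediv_cancel_left _ (by norm_num)]

-- ===== VERDICT (by name: the statement is the Claim_ definition above) =====
theorem getIndexForRequirementOperationDicts_spec : Claim_equal_getIndexForRequirementOperationDicts := by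
  intro firstOperand secondOperand _
  unfold Spec_getIndexForRequirementOperationDicts
  unfold getIndexForRequirementOperationDicts getIndexForRequirementOperationDicts_alt
  cases secondOperand with
  | none => simp only [pvHorner_eq, pvPack_eq]
  | some s => simp only [pvHorner_eq, pvPack_eq]
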